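-- pv_equiv track=rewrite | github.com/AlejandroSierraUV26/Programacion_Imperactiva_Monitorias | Codigos_2024-2/Clase 2/proposiciones.py | frase_a_binario
-- ===== SOURCE A (Python) =====
-- def letras_binarias():
--     letras = [chr(i) for i in range(ord('A'), ord('Z')+1)]
--     binarios = [bin(i - ord('A') + 1)[2:] for i in range(ord('A'), ord('Z')+1)]
--     return dict(zip(letras, binarios))
--
-- def frase_a_binario(frase):
--     letras_en_binario = letras_binarias()
--     frase_binaria = ""
--     for letra in frase:
--         if letra.upper() in letras_en_binario:
--             frase_binaria += letras_en_binario[letra.upper()] + " "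
--         else:
--             frase_binaria += " "
--     return frase_binaria.strip()
-- ===== SOURCE B (Python) =====
-- def frase_a_binario(frase):
--     # Binary code computed by recursive bit extraction instead of a lookup table;
--     # the trailing/leading blanks are removed by trimming the token list itself
--     # (no str.strip), then the tokens are joined once.
--     def bits(n):
--         return bits(n >> 1) + str(n & 1) if n > 1 else str(n)
--     tokens = []
--     for letra in frase:
--         u = letra.upper()
--         if len(u) == 1 and 'A' <= u <= 'Z':
--             tokens.append(bits(ord(u) - ord('A') + 1))
--         else:
--             tokens.append('')
--     while tokens and tokens[0] == '':
--         tokens.pop(0)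
--     while tokens and tokens[-1] == '':
--         tokens.pop()
--     return ' '.join(tokens)
-- ===== Notes on version B (the rewrite author's own statement) =====
-- stated objective: alternative
-- what changed: B drops A's precomputed 26-entry dictionary and its string accumulation with strip(): it computes each code by recursive bit extraction from the code point, trims the empty tokens off both ends of the token list, and joins once with a single space.
import Mathlib
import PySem

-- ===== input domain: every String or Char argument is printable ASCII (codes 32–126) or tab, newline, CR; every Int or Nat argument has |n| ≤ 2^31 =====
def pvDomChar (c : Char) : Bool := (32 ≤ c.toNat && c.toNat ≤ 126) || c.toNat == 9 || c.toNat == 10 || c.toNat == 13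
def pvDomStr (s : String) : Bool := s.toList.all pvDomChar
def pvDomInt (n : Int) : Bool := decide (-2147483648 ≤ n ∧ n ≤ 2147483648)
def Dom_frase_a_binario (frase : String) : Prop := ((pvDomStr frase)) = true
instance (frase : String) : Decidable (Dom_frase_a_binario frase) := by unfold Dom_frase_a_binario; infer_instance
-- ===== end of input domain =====

-- B replaces A's precomputed letter→binary dictionary and strip() of an accumulated
-- string by recursive bit extraction per character plus trimming of the token list.
-- Objective: alternative (no speed claim).

-- ===== PORT A =====
-- strings are handled as List Char (Lean's own String.append is opaque to the kernel)
def letras_binarias : PySem.Dict Char (List Char) :=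
  let letras := (PySem.List.pyRange 65 91 1).map (fun i => Char.ofNat i.toNat)
  let binarios := (PySem.List.pyRange 65 91 1).map (fun i =>
    PySem.List.slice (PySem.Int.toBinChars0b (i - 65 + 1)) (some 2) none)
  PySem.Dict.ofList (letras.zip binarios)

def frase_a_binario (frase : String) : String :=
  let letras_en_binario := letras_binarias
  let frase_binaria := frase.toList.foldl
    (fun fb letra =>
      if letras_en_binario.contains (PySem.Chars.upperChar letra) then
        fb ++ letras_en_binario.getD (PySem.Chars.upperChar letra) [] ++ [' ']
      else fb ++ [' ']) []
  String.ofList (PySem.Chars.strip frase_binaria)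

-- ===== PORT B =====
-- Source B's recursive helper 'bits': bits(n>>1)+str(n&1) if n>1 else str(n);
-- fuel = n only makes the recursion structural (n/2 < n, so fuel n never runs out)
def bitsFuel : Nat → Nat → List Char
  | 0, n => (PySem.Int.toStr (n : Int)).toList
  | f + 1, n =>
    if 1 < n then bitsFuel f (n / 2) ++ [Char.ofNat (48 + n % 2)]
    else (PySem.Int.toStr (n : Int)).toList

def bits (n : Nat) : List Char := bitsFuel n n

-- the per-character token of Source B's first loop; Lean iterates chars, so the len==1
-- guard of Source B (which only matters for non-ASCII multi-char uppercasings) has no counterpart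
def tokenB (letra : Char) : List Char :=
  let u := PySem.Chars.upperChar letra
  if 'A' ≤ u ∧ u ≤ 'Z' then bits (u.toNat - 65 + 1) else []

def frase_a_binario_alt (frase : String) : String :=
  let tokens := frase.toList.map tokenB
  -- while tokens and tokens[0] == '': tokens.pop(0)
  let tokens := tokens.dropWhile (· == ([] : List Char))
  -- while tokens and tokens[-1] == '': tokens.pop()
  let tokens := ((tokens.reverse).dropWhile (· == ([] : List Char))).reverse
  String.ofList (PySem.Chars.join [' '] tokens)

-- ===== PRECONDITION & SPEC =====
def Spec_frase_a_binario (frase : String) (out : String) : Prop := out = frase_a_binario_alt frase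
instance (frase : String) (out : String) : Decidable (Spec_frase_a_binario frase out) := by unfold Spec_frase_a_binario; infer_instance

-- ===== CLAIM =====
def Claim_equal_frase_a_binario : Prop := ∀ (frase : String), Dom_frase_a_binario frase → Spec_frase_a_binario frase (frase_a_binario frase)

-- ===== LEMMAS AND PROOFS =====

-- what A appends for one character equals B's token plus a space (checked on all 127 chars ≤ 126)
lemma piece_eq (c : Char) (h : c.toNat ≤ 126) :
    (if letras_binarias.contains (PySem.Chars.upperChar c) then
       letras_binarias.getD (PySem.Chars.upperChar c) [] ++ [' ']
     else [' ']) = tokenB c ++ [' '] := by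
  have hall : ∀ n : Fin 127,
      (if letras_binarias.contains (PySem.Chars.upperChar (Char.ofNat (n : Nat))) then
         letras_binarias.getD (PySem.Chars.upperChar (Char.ofNat (n : Nat))) [] ++ [' ']
       else [' ']) = tokenB (Char.ofNat (n : Nat)) ++ [' '] := by
    set_option maxRecDepth 4000 in decide
  have := hall ⟨c.toNat, by omega⟩
  simpa [Char.ofNat_toNat] using this

-- B's tokens never contain whitespace (checked on all 127 chars ≤ 126)
lemma token_nonspace (c : Char) (h : c.toNat ≤ 126) :
    ∀ ch ∈ tokenB c, PySem.Chars.isspace ch = false := by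
  have hall : ∀ n : Fin 127,
      (tokenB (Char.ofNat (n : Nat))).all (fun ch => !PySem.Chars.isspace ch) = true := by
    set_option maxRecDepth 4000 in decide
  have := hall ⟨c.toNat, by omega⟩
  rw [Char.ofNat_toNat] at this
  intro ch hch
  simpa using List.all_eq_true.mp this ch hch

lemma flat_eq_join (ts : List (List Char)) (h : ts ≠ []) :
    (ts.map (· ++ [' '])).flatten = PySem.Chars.join [' '] ts ++ [' '] := by
  induction ts with
  | nil => cases h rfl
  | cons a t ih =>
    cases t with
    | nil => simp [PySem.Chars.join, List.intercalate]
    | cons b t' =>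
      simp only [List.map_cons, List.flatten_cons] at *
      rw [ih (by simp)]
      simp [PySem.Chars.join, List.intercalate]

lemma rstrip_append_space (x : List Char) :
    PySem.Chars.rstrip (x ++ [' ']) = PySem.Chars.rstrip x := by
  simp [PySem.Chars.rstrip, PySem.Chars.isspace]

lemma strip_append_space (x : List Char) :
    PySem.Chars.strip (x ++ [' ']) = PySem.Chars.strip x := by
  by_cases hx : List.dropWhile PySem.Chars.isspace x = []
  · simp [PySem.Chars.strip, PySem.Chars.lstrip, PySem.Chars.rstrip,
      List.dropWhile_append, hx, List.dropWhile, PySem.Chars.isspace]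
  · simp only [PySem.Chars.strip, PySem.Chars.lstrip, List.dropWhile_append, hx,
      List.isEmpty_iff]
    exact rstrip_append_space _

lemma join_cons (t : List Char) (ts : List (List Char)) :
    PySem.Chars.join [' '] (t :: ts) =
      t ++ (if ts = [] then [] else ' ' :: PySem.Chars.join [' '] ts) := by
  cases ts with
  | nil => simp [PySem.Chars.join, List.intercalate]
  | cons b t' => simp [PySem.Chars.join, List.intercalate]

lemma join_snoc (t : List Char) (ts : List (List Char)) (h : ts ≠ []) :
    PySem.Chars.join [' '] (ts ++ [t]) =
      PySem.Chars.join [' '] ts ++ ' ' :: t := by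
  induction ts with
  | nil => cases h rfl
  | cons a rest ih =>
    cases rest with
    | nil => simp [PySem.Chars.join, List.intercalate]
    | cons b r' =>
      rw [List.cons_append, join_cons, join_cons a (b :: r'), ih (by simp)]
      simp

lemma rev_join (ts : List (List Char)) :
    (PySem.Chars.join [' '] ts).reverse =
      PySem.Chars.join [' '] ((ts.map List.reverse).reverse) := by
  induction ts with
  | nil => simp [PySem.Chars.join, List.intercalate]
  | cons t rest ih =>
    rw [join_cons]
    cases hr : rest with
    | nil => simp [PySem.Chars.join, List.intercalate]
    | cons b r' =>
      rw [← hr]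
      have hne : rest ≠ [] := by simp [hr]
      simp only [if_neg hne, List.map_cons, List.reverse_cons]
      rw [join_snoc _ _ (by simp [hr]), ← ih]
      simp

lemma lstrip_join (ts : List (List Char))
    (hns : ∀ t ∈ ts, ∀ c ∈ t, PySem.Chars.isspace c = false) :
    PySem.Chars.lstrip (PySem.Chars.join [' '] ts) =
      PySem.Chars.join [' '] (ts.dropWhile (· == ([] : List Char))) := by
  induction ts with
  | nil => simp [PySem.Chars.join, List.intercalate, PySem.Chars.lstrip]
  | cons t rest ih =>
    cases ht : t with
    | nil =>
      rw [join_cons]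
      cases hr : rest with
      | nil => simp [PySem.Chars.join, List.intercalate, PySem.Chars.lstrip]
      | cons b r' =>
        rw [← hr]
        have hne : rest ≠ [] := by simp [hr]
        simp only [if_neg hne, List.nil_append, List.dropWhile_cons]
        have : PySem.Chars.lstrip (' ' :: PySem.Chars.join [' '] rest) =
            PySem.Chars.lstrip (PySem.Chars.join [' '] rest) := by
          simp [PySem.Chars.lstrip, List.dropWhile, PySem.Chars.isspace]
        rw [this, ih (fun u hu => hns u (List.mem_cons_of_mem _ hu))]
        simp
    | cons c t' =>
      have hc : PySem.Chars.isspace c = false :=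
        hns t (by simp) c (by simp [ht])
      rw [join_cons,
        show List.dropWhile (fun x => x == ([] : List Char)) ((c :: t') :: rest)
            = (c :: t') :: rest from by simp,
        join_cons]
      simp [PySem.Chars.lstrip, hc]

lemma rstrip_join (ts : List (List Char))
    (hns : ∀ t ∈ ts, ∀ c ∈ t, PySem.Chars.isspace c = false) :
    PySem.Chars.rstrip (PySem.Chars.join [' '] ts) =
      PySem.Chars.join [' ']
        ((ts.reverse.dropWhile (· == ([] : List Char))).reverse) := by
  unfold PySem.Chars.rstrip
  rw [rev_join]
  have hmap : (ts.map List.reverse).reverse = ts.reverse.map List.reverse := by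
    simp [List.map_reverse]
  rw [hmap]
  have hns' : ∀ t ∈ ts.reverse.map List.reverse, ∀ c ∈ t,
      PySem.Chars.isspace c = false := by
    intro t ht c hc
    obtain ⟨u, hu, rfl⟩ := List.mem_map.mp ht
    exact hns u (List.mem_reverse.mp hu) c (List.mem_reverse.mp hc)
  have := lstrip_join (ts.reverse.map List.reverse) hns'
  unfold PySem.Chars.lstrip at this
  rw [this]
  have hpred : ((fun x => x == ([] : List Char)) ∘ List.reverse) =
      (fun x : List Char => x == []) := by
    funext u; cases u <;> simp [Function.comp]
  have hdw : List.dropWhile (· == ([] : List Char)) (ts.reverse.map List.reverse) =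
      (ts.reverse.dropWhile (· == ([] : List Char))).map List.reverse := by
    rw [List.dropWhile_map, hpred]
  rw [hdw, rev_join]
  simp [List.map_map]

lemma strip_join (ts : List (List Char))
    (hns : ∀ t ∈ ts, ∀ c ∈ t, PySem.Chars.isspace c = false) :
    PySem.Chars.strip (PySem.Chars.join [' '] ts) =
      PySem.Chars.join [' ']
        ((((ts.dropWhile (· == ([] : List Char))).reverse).dropWhile
          (· == ([] : List Char))).reverse) := by
  unfold PySem.Chars.strip
  have h1 : PySem.Chars.lstrip (PySem.Chars.join [' '] ts) =
      PySem.Chars.join [' '] (ts.dropWhile (· == ([] : List Char))) :=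
    lstrip_join ts hns
  rw [h1]
  exact rstrip_join _ (fun t ht => hns t ((List.dropWhile_sublist _).mem ht))

-- ===== VERDICT (by name: the statement is the Claim_ definition above) =====
theorem frase_a_binario_spec : Claim_equal_frase_a_binario := by
  intro frase hdom
  unfold Spec_frase_a_binario frase_a_binario frase_a_binario_alt
  have hfun : (fun (fb : List Char) (letra : Char) =>
      if letras_binarias.contains (PySem.Chars.upperChar letra) then
        fb ++ letras_binarias.getD (PySem.Chars.upperChar letra) [] ++ [' ']
      else fb ++ [' ']) =
      (fun fb letra => fb ++
        (if letras_binarias.contains (PySem.Chars.upperChar letra) then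
          letras_binarias.getD (PySem.Chars.upperChar letra) [] ++ [' ']
         else [' '])) := by
    funext fb letra; split <;> simp
  simp only [hfun, PySem.List.foldl_append_eq_flatMap, List.nil_append]
  have hchars : ∀ c ∈ frase.toList, c.toNat ≤ 126 := by
    intro c hc
    have := (List.all_eq_true.mp hdom) c hc
    simp only [pvDomChar, Bool.or_eq_true, Bool.and_eq_true, decide_eq_true_eq,
      beq_iff_eq] at this
    omega
  rw [show (frase.toList.flatMap
      (fun letra => if letras_binarias.contains (PySem.Chars.upperChar letra) then
          letras_binarias.getD (PySem.Chars.upperChar letra) [] ++ [' ']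
        else [' '])) = ((frase.toList.map tokenB).map (· ++ [' '])).flatten from by
    rw [List.flatMap_def, List.map_map]
    exact congrArg List.flatten
      (List.map_congr_left (fun c hc => piece_eq c (hchars c hc)))]
  have hns : ∀ t ∈ frase.toList.map tokenB, ∀ c ∈ t,
      PySem.Chars.isspace c = false := by
    intro t ht c hc
    obtain ⟨u, hu, rfl⟩ := List.mem_map.mp ht
    exact token_nonspace u (hchars u hu) c hc
  cases hf : frase.toList.map tokenB with
  | nil => simp [PySem.Chars.join, List.intercalate, PySem.Chars.strip,
      PySem.Chars.lstrip, PySem.Chars.rstrip]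
  | cons a t =>
    rw [← hf, flat_eq_join _ (by simp [hf]), strip_append_space, strip_join _ hns]
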